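-- pv_equiv track=rewrite | github.com/sweaterman/Problem-solving | 프로그래머스/unrated/250136. ［PCCP 기출문제］ 2번 ／ 석유 시추/［PCCP 기출문제］ 2번 ／ 석유 시추.py | solution
-- ===== SOURCE A (Python) =====
-- from collections import deque
--
-- def solution(land):
--     lx, ly = len(land), len(land[0])
--     visit = [[False] * ly for _ in range(lx)]
--     delta = [[-1, 0], [1, 0], [0, -1], [0, 1]]
--     s = [0] * ly
--
--
--     for i in range(lx):
--         for j in range(ly):
--             if land[i][j] == 1 and not visit[i][j]:
--                 visit[i][j] = True
--                 q = deque()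
--                 q.append((i, j))
--                 check = 1
--                 li = [j]
--
--                 while q:
--                     tmp = q.popleft()
--                     for d in delta:
--                         nx, ny = tmp[0] + d[0], tmp[1] + d[1]
--                         if 0 <= nx < lx and 0 <= ny < ly and land[nx][ny] == 1 and not visit[nx][ny]:
--                             visit[nx][ny] = True
--                             check += 1
--                             li.append(ny)
--                             q.append((nx, ny))
--
--                 li = set(li)
--                 li = list(li)
--                 for l in li:
--                     s[l] += check
--
--     return max(s)
-- ===== SOURCE B (Python) =====
-- def solution(land):
--     rows, cols = len(land), len(land[0])
--     # iterative min-label propagation (Jacobi passes) instead of BFS flood fill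
--     lab = {(i, j): i * cols + j for i in range(rows) for j in range(cols) if land[i][j] == 1}
--     changed = True
--     while changed:
--         changed = False
--         new = {}
--         for (i, j), cur in lab.items():
--             m = cur
--             for n in ((i - 1, j), (i + 1, j), (i, j - 1), (i, j + 1)):
--                 if n in lab and lab[n] < m:
--                     m = lab[n]
--             new[(i, j)] = m
--             if m != cur:
--                 changed = True
--         lab = new
--     best = 0
--     for j in range(cols):
--         collabels = {lab[(i, j)] for i in range(rows) if (i, j) in lab}
--         total = sum(1 for v in lab.values() if v in collabels)
--         best = max(best, total)
--     return best
-- ===== Notes on version B (the rewrite author's own statement) =====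
-- stated objective: alternative
-- what changed: Replaces A's per-seed BFS flood fill (deque + visited matrix, accumulating per-component column lists) by whole-grid iterative minimum-label propagation: every oil cell starts with its own index as label, relaxation passes replace each label by the minimum over the cell and its oil neighbours until a fixpoint, and each column then counts the cells whose component label occurs in that column.
-- outside the precondition, e.g. on solution([]): A raises IndexError, B raises IndexError; on solution([[]]): A raises ValueError, B returns 0; on solution([[1, 1], [1]]): A raises IndexError, B raises IndexError
import Mathlib
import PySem

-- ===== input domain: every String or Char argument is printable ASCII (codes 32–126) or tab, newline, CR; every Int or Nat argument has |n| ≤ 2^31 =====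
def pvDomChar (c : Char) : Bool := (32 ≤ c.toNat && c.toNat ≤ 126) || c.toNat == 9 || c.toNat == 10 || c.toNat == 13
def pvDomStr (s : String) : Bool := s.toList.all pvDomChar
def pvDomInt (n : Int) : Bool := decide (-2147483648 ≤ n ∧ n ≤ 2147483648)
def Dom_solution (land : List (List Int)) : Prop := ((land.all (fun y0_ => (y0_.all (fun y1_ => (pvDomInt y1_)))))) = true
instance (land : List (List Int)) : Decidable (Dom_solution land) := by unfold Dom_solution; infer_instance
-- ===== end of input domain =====

-- B replaces A's per-seed BFS flood fill by whole-grid iterative min-label propagation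
-- (repeated relaxation passes over a cell→label dict until a fixpoint), then counts per
-- column the cells whose component label occurs in that column; objective: alternative.

-- ===== PORT A =====
-- land[x][y]; A evaluates it only after the 0 ≤ x < lx ∧ 0 ≤ y < ly bounds checks, so the defaults are never taken
def pvAt (land : List (List Int)) (x y : Int) : Int :=
  PySem.List.pyGetD (PySem.List.pyGetD land x []) y 0

def pvDeltas : List (Int × Int) := [(-1, 0), (1, 0), (0, -1), (0, 1)]

-- all grid coordinates (i, j), 0 ≤ i < lx, 0 ≤ j < ly (used by the BFS termination measure)
def pvAllCells (lx ly : Int) : List (Int × Int) :=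
  (PySem.List.pyRange 0 lx 1).flatMap (fun i => (PySem.List.pyRange 0 ly 1).map (fun j => (i, j)))

def pvUnvis (lx ly : Int) (visit : List (Int × Int)) : Nat :=
  ((pvAllCells lx ly).filter (fun c => !(visit.contains c))).length

-- the body of A's `for d in delta` loop (visit is the set of cells marked True)
def pvStep (land : List (List Int)) (lx ly : Int) (t : Int × Int)
    (st : List (Int × Int) × List (Int × Int) × Int × List Int) (d : Int × Int) :
    List (Int × Int) × List (Int × Int) × Int × List Int :=
  let nx := t.1 + d.1
  let ny := t.2 + d.2
  if 0 ≤ nx ∧ nx < lx ∧ 0 ≤ ny ∧ ny < ly ∧ pvAt land nx ny = 1 ∧ (nx, ny) ∉ st.2.1 then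
    (st.1 ++ [(nx, ny)], (nx, ny) :: st.2.1, st.2.2.1 + 1, st.2.2.2 ++ [ny])
  else st

theorem pvMem_allCells {lx ly : Int} {c : Int × Int} :
    c ∈ pvAllCells lx ly ↔ 0 ≤ c.1 ∧ c.1 < lx ∧ 0 ≤ c.2 ∧ c.2 < ly := by
  obtain ⟨a, b⟩ := c
  simp [pvAllCells, List.mem_flatMap, PySem.List.mem_pyRange_one]
  tauto

theorem pvLength_filter_lt {α : Type} {l : List α} {p : α → Bool} {x : α}
    (hx : x ∈ l) (hpx : p x = false) : (l.filter p).length < l.length := by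
  induction l with
  | nil => cases hx
  | cons a l ih =>
    rcases List.mem_cons.1 hx with rfl | hx'
    · simp only [List.filter_cons, hpx]
      have := List.length_filter_le p l
      simpa using Nat.lt_succ_of_le this
    · by_cases hpa : p a
      · simpa [List.filter_cons, hpa] using Nat.succ_lt_succ (ih hx')
      · simp only [List.filter_cons, Bool.not_eq_true] at hpa ⊢
        rw [hpa]
        exact Nat.lt_trans (ih hx') (Nat.lt_succ_self _)

theorem pvUnvis_cons_lt {lx ly : Int} {visit : List (Int × Int)} {c : Int × Int}
    (hc : c ∈ pvAllCells lx ly) (hnv : c ∉ visit) :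
    pvUnvis lx ly (c :: visit) < pvUnvis lx ly visit := by
  unfold pvUnvis
  have hsplit : (pvAllCells lx ly).filter (fun x => !((c :: visit).contains x))
      = ((pvAllCells lx ly).filter (fun x => !(visit.contains x))).filter (fun x => !(x == c)) := by
    rw [List.filter_filter]
    apply List.filter_congr
    intro x _
    by_cases hxc : x = c
    · subst hxc; simp
    · simp [hxc]
  rw [hsplit]
  apply pvLength_filter_lt (x := c)
  · simp [List.mem_filter, hc, hnv]
  · simp

theorem pvStep_measure (land : List (List Int)) (lx ly : Int) (t : Int × Int)
    (st : List (Int × Int) × List (Int × Int) × Int × List Int) (d : Int × Int) :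
    (pvStep land lx ly t st d).1.length + pvUnvis lx ly (pvStep land lx ly t st d).2.1 ≤
      st.1.length + pvUnvis lx ly st.2.1 := by
  simp only [pvStep]
  split
  next h =>
    obtain ⟨h1, h2, h3, h4, _, h6⟩ := h
    have hc : (t.1 + d.1, t.2 + d.2) ∈ pvAllCells lx ly := by
      rw [pvMem_allCells]; exact ⟨h1, h2, h3, h4⟩
    have := pvUnvis_cons_lt (visit := st.2.1) hc h6
    simp only [List.length_append, List.length_cons, List.length_nil]
    omega
  next => exact le_refl _

theorem pvFold_measure (land : List (List Int)) (lx ly : Int) (t : Int × Int)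
    (ds : List (Int × Int)) (st : List (Int × Int) × List (Int × Int) × Int × List Int) :
    (ds.foldl (pvStep land lx ly t) st).1.length + pvUnvis lx ly (ds.foldl (pvStep land lx ly t) st).2.1 ≤
      st.1.length + pvUnvis lx ly st.2.1 := by
  induction ds generalizing st with
  | nil => exact le_refl _
  | cons d ds ih =>
    simp only [List.foldl_cons]
    exact le_trans (ih (pvStep land lx ly t st d)) (pvStep_measure land lx ly t st d)

-- A's `while q` BFS loop; state (q, visit, check, li)
def pvBFS (land : List (List Int)) (lx ly : Int) (q visit : List (Int × Int)) (check : Int)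
    (li : List Int) : List (Int × Int) × Int × List Int :=
  match q with
  | [] => (visit, check, li)
  | t :: rest =>
    let st := pvDeltas.foldl (pvStep land lx ly t) (rest, visit, check, li)
    pvBFS land lx ly st.1 st.2.1 st.2.2.1 st.2.2.2
termination_by pvUnvis lx ly visit + q.length
decreasing_by
  have h := pvFold_measure land lx ly t pvDeltas (rest, visit, check, li)
  have h2 : (t :: rest).length = rest.length + 1 := rfl
  simp only at h ⊢
  omega

-- the body of A's double `for i … for j …` loop; state (visit, s)
def pvOuterStep (land : List (List Int)) (lx ly : Int)
    (st : List (Int × Int) × List Int) (c : Int × Int) : List (Int × Int) × List Int :=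
  if pvAt land c.1 c.2 = 1 ∧ c ∉ st.1 then
    let r := pvBFS land lx ly [c] (c :: st.1) 1 [c.2]
    (r.1, (PySem.Set.ofList r.2.2).foldl
      (fun s l => PySem.List.pySetD s l (PySem.List.pyGetD s l 0 + r.2.1)) st.2)
  else st

def solution (land : List (List Int)) : Int :=
  let lx : Int := land.length
  let ly : Int := (land.headD []).length
  let fin := (PySem.List.pyRange 0 lx 1).foldl (fun st i =>
      (PySem.List.pyRange 0 ly 1).foldl (fun st j => pvOuterStep land lx ly st (i, j)) st)
    ([], List.replicate ly.toNat 0)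
  (PySem.List.max? fin.2 (fun x => x)).getD 0

-- ===== PORT B =====
def pvNbrs (c : Int × Int) : List (Int × Int) :=
  [(c.1 - 1, c.2), (c.1 + 1, c.2), (c.1, c.2 - 1), (c.1, c.2 + 1)]

-- Source B's dict comprehension {(i, j): i*cols + j …}
def pvLab0 (land : List (List Int)) (rows cols : Int) : PySem.Dict (Int × Int) Int :=
  (PySem.List.pyRange 0 rows 1).foldl (fun d i =>
    (PySem.List.pyRange 0 cols 1).foldl (fun d j =>
      if pvAt land i j = 1 then d.insert (i, j) (i * cols + j) else d) d) PySem.Dict.empty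

-- one relaxation pass: returns (new, changed)
def pvPass (lab : PySem.Dict (Int × Int) Int) : PySem.Dict (Int × Int) Int × Bool :=
  lab.items.foldl (fun acc kv =>
    let m := (pvNbrs kv.1).foldl (fun m n =>
        match lab.get? n with
        | some v => if v < m then v else m
        | none => m) kv.2
    (acc.1.insert kv.1 m, acc.2 || decide (¬ m = kv.2))) (PySem.Dict.empty, false)

-- Source B's `while changed` loop; the fuel only makes it total, it never runs out (each
-- continuing pass strictly decreases the sum of the nonnegative labels)
def pvLoop : Nat → PySem.Dict (Int × Int) Int → PySem.Dict (Int × Int) Int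
  | 0, lab => lab
  | fuel + 1, lab =>
    let p := pvPass lab
    if p.2 then pvLoop fuel p.1 else p.1

def pvFuel (lab : PySem.Dict (Int × Int) Int) : Nat :=
  lab.values.foldl (fun a v => a + v.toNat) 0 + 1

def pvLabD (land : List (List Int)) : PySem.Dict (Int × Int) Int :=
  let lab0 := pvLab0 land land.length (land.headD []).length
  pvLoop (pvFuel lab0) lab0

def solution_alt (land : List (List Int)) : Int :=
  let rows : Int := land.length
  let cols : Int := (land.headD []).length
  let lab := pvLabD land
  (PySem.List.pyRange 0 cols 1).foldl (fun best j =>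
    let collabels := (PySem.List.pyRange 0 rows 1).foldl (fun s i =>
        match lab.get? (i, j) with
        | some v => PySem.Set.add s v
        | none => s) PySem.Set.empty
    let total := lab.values.foldl (fun t v => if collabels.contains v then t + 1 else t) (0 : Int)
    max best total) 0

-- ===== PRECONDITION & SPEC =====
-- Pre_ excludes exactly the inputs on which A raises: the empty grid and a first row of
-- length 0 (max([]) / len(land[0]) fail) and ragged grids with a row shorter than row 0
-- (land[i][j] IndexError); on everything else A returns normally.
def Pre_solution (land : List (List Int)) : Prop :=
  land ≠ [] ∧ 0 < (land.headD []).length ∧ ∀ row ∈ land, (land.headD []).length ≤ row.length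
instance (land : List (List Int)) : Decidable (Pre_solution land) := by
  unfold Pre_solution; infer_instance

def pvWitness_solution : List (List Int) := [[1, 0], [0, 1]]

def Spec_solution (land : List (List Int)) (out : Int) : Prop := out = solution_alt land
instance (land : List (List Int)) (out : Int) : Decidable (Spec_solution land out) := by
  unfold Spec_solution; infer_instance

-- ===== CLAIM (what is proved, stated in full; the proofs are below) =====
def Claim_equal_solution : Prop := ∀ (land : List (List Int)),
  Dom_solution land → Pre_solution land → Spec_solution land (solution land)

-- ===== LEMMAS AND PROOFS =====

-- ---------- spec-level vocabulary (proof helpers only) ----------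
def pvLx (land : List (List Int)) : Int := land.length
def pvLy (land : List (List Int)) : Int := (land.headD []).length
def pvOilList (land : List (List Int)) : List (Int × Int) :=
  (pvAllCells (pvLx land) (pvLy land)).filter (fun c => pvAt land c.1 c.2 = 1)
def pvOil (land : List (List Int)) (c : Int × Int) : Prop := c ∈ pvOilList land
def pvAdj (land : List (List Int)) (c d : Int × Int) : Prop :=
  pvOil land c ∧ pvOil land d ∧ d ∈ pvNbrs c
def pvConn (land : List (List Int)) : (Int × Int) → (Int × Int) → Prop :=
  Relation.ReflTransGen (pvAdj land)
def pvG (land : List (List Int)) (c : Int × Int) : Int := (pvLabD land).getD c (-1)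
def pvIdxOf (land : List (List Int)) (c : Int × Int) : Int := c.1 * pvLy land + c.2
def pvPassF (land : List (List Int)) (g : (Int × Int) → Int) (c : Int × Int) : Int :=
  (pvNbrs c).foldl (fun m n => if n ∈ pvOilList land then (if g n < m then g n else m) else m) (g c)
def pvShaped (land : List (List Int)) (g : (Int × Int) → Int)
    (d : PySem.Dict (Int × Int) Int) : Prop :=
  d.items = (pvOilList land).map (fun c => (c, g c))
def pvP2 (land : List (List Int)) (g : (Int × Int) → Int) : Prop :=
  ∀ c ∈ pvOilList land, ∃ d ∈ pvOilList land, pvConn land c d ∧ g c = pvIdxOf land d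

-- ---------- grid basics ----------
theorem pvNodup_allCells (lx ly : Int) : (pvAllCells lx ly).Nodup := by
  have : pvAllCells lx ly = (PySem.List.pyRange 0 lx 1) ×ˢ (PySem.List.pyRange 0 ly 1) := rfl
  rw [this]
  exact List.Nodup.product (PySem.List.nodup_pyRange_one _ _) (PySem.List.nodup_pyRange_one _ _)

theorem pvMem_oilList {land : List (List Int)} {c : Int × Int} :
    c ∈ pvOilList land ↔ (0 ≤ c.1 ∧ c.1 < pvLx land ∧ 0 ≤ c.2 ∧ c.2 < pvLy land) ∧
      pvAt land c.1 c.2 = 1 := by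
  simp [pvOilList, List.mem_filter, pvMem_allCells]

theorem pvNodup_oilList (land : List (List Int)) : (pvOilList land).Nodup :=
  (pvNodup_allCells _ _).filter _

theorem pvNbrs_symm {c d : Int × Int} : d ∈ pvNbrs c ↔ c ∈ pvNbrs d := by
  obtain ⟨a, b⟩ := c; obtain ⟨e, f⟩ := d
  simp [pvNbrs, Prod.ext_iff]
  omega

theorem pvAdj_symm {land : List (List Int)} : Symmetric (pvAdj land) := by
  intro c d ⟨h1, h2, h3⟩
  exact ⟨h2, h1, pvNbrs_symm.1 h3⟩

theorem pvConn_symm {land : List (List Int)} {c d : Int × Int} (h : pvConn land c d) :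
    pvConn land d c :=
  Relation.ReflTransGen.symmetric pvAdj_symm h

theorem pvIdxOf_nonneg {land : List (List Int)} {c : Int × Int} (hc : c ∈ pvOilList land) :
    0 ≤ pvIdxOf land c := by
  obtain ⟨⟨h1, _, h3, h4⟩, _⟩ := pvMem_oilList.1 hc
  have : 0 ≤ c.1 * pvLy land := mul_nonneg h1 (le_trans h3 (le_of_lt h4))
  unfold pvIdxOf; omega

theorem pvIdxOf_inj {land : List (List Int)} {c d : Int × Int}
    (hc : c ∈ pvOilList land) (hd : d ∈ pvOilList land)
    (h : pvIdxOf land c = pvIdxOf land d) : c = d := by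
  obtain ⟨⟨_, _, hc3, hc4⟩, _⟩ := pvMem_oilList.1 hc
  obtain ⟨⟨_, _, hd3, hd4⟩, _⟩ := pvMem_oilList.1 hd
  unfold pvIdxOf at h
  have hkey : (c.1 - d.1) * pvLy land = d.2 - c.2 := by ring_nf; linarith
  have h1 : c.1 = d.1 := by
    by_contra hne
    rcases lt_or_gt_of_ne hne with hlt | hgt
    · have : (c.1 - d.1) * pvLy land ≤ (-1) * pvLy land :=
        mul_le_mul_of_nonneg_right (by omega) (by omega)
      omega
    · have : (1 : Int) * pvLy land ≤ (c.1 - d.1) * pvLy land :=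
        mul_le_mul_of_nonneg_right (by omega) (by omega)
      omega
  have : c.2 = d.2 := by rw [h1] at h; omega
  exact Prod.ext h1 this

-- ---------- generic fold reshaping ----------
theorem pvFoldl_flatMap {α β σ : Type} (l : List α) (f : α → List β) (F : σ → β → σ) (init : σ) :
    (l.flatMap f).foldl F init = l.foldl (fun st a => (f a).foldl F st) init := by
  induction l generalizing init with
  | nil => rfl
  | cons a l ih => simp [List.flatMap_cons, List.foldl_append, ih]

theorem pvNestedFold {σ : Type} (lx ly : Int) (F : σ → (Int × Int) → σ) (init : σ) :
    (PySem.List.pyRange 0 lx 1).foldl (fun st i =>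
      (PySem.List.pyRange 0 ly 1).foldl (fun st j => F st (i, j)) st) init =
    (pvAllCells lx ly).foldl F init := by
  rw [pvAllCells, pvFoldl_flatMap]
  apply PySem.List.foldl_congr_mem
  intro st i _
  rw [List.foldl_map]

theorem pvFoldl_ite_filter {α σ : Type} (l : List α) (p : α → Prop) [DecidablePred p]
    (F : σ → α → σ) (init : σ) :
    l.foldl (fun st a => if p a then F st a else st) init =
      (l.filter (fun a => decide (p a))).foldl F init := by
  induction l generalizing init with
  | nil => rfl
  | cons a l ih =>
    by_cases h : p a <;> simp [h, ih]

-- ---------- B side: shape of the label dict through the passes ----------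
theorem pvItems_empty : (PySem.Dict.empty : PySem.Dict (Int × Int) Int).items = [] := rfl
theorem pvFoldl_pair {α σ τ : Type} (l : List α) (fa : σ → α → σ) (fb : τ → α → τ)
    (a : σ) (b : τ) :
    l.foldl (fun st x => (fa st.1 x, fb st.2 x)) (a, b) = (l.foldl fa a, l.foldl fb b) := by
  induction l generalizing a b with
  | nil => rfl
  | cons x l ih => simp [ih]

theorem pvFoldl_or {α : Type} (l : List α) (p : α → Bool) (b : Bool) :
    l.foldl (fun acc x => acc || p x) b = (b || l.any p) := by
  induction l generalizing b with
  | nil => simp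
  | cons x l ih => simp [ih, Bool.or_assoc]

theorem pvShaped_keys {land : List (List Int)} {g : (Int × Int) → Int}
    {d : PySem.Dict (Int × Int) Int} (h : pvShaped land g d) : d.keys = pvOilList land := by
  unfold PySem.Dict.keys
  rw [h, List.map_map]
  have : ((fun x : (Int × Int) × Int => x.1) ∘ fun c => (c, g c)) = id := rfl
  rw [this, List.map_id]

theorem pvShaped_get? {land : List (List Int)} {g : (Int × Int) → Int}
    {d : PySem.Dict (Int × Int) Int} (h : pvShaped land g d) (c : Int × Int) :
    d.get? c = if c ∈ pvOilList land then some (g c) else none := by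
  have hk : d.keys = pvOilList land := pvShaped_keys h
  have hnd : d.keys.Nodup := by rw [hk]; exact pvNodup_oilList land
  split
  next hmem =>
    refine PySem.Dict.get?_of_mem_items d ?_ hnd
    rw [h, List.mem_map]
    exact ⟨c, hmem, rfl⟩
  next hmem =>
    rw [PySem.Dict.get?_eq_none_iff_not_mem_keys, hk]
    exact hmem

theorem pvShaped_getD {land : List (List Int)} {g : (Int × Int) → Int}
    {d : PySem.Dict (Int × Int) Int} (h : pvShaped land g d) {c : Int × Int}
    (hc : c ∈ pvOilList land) (dflt : Int) : d.getD c dflt = g c := by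
  rw [PySem.Dict.getD_eq_get?_getD, pvShaped_get? h, if_pos hc]
  rfl

theorem pvShaped_values {land : List (List Int)} {g : (Int × Int) → Int}
    {d : PySem.Dict (Int × Int) Int} (h : pvShaped land g d) :
    d.values = (pvOilList land).map g := by
  unfold PySem.Dict.values
  rw [h, List.map_map]
  rfl

theorem pvLab0_shaped (land : List (List Int)) :
    pvShaped land (pvIdxOf land) (pvLab0 land (pvLx land) (pvLy land)) := by
  unfold pvShaped pvLab0
  have h1 : (PySem.List.pyRange 0 (pvLx land) 1).foldl (fun d i =>
      (PySem.List.pyRange 0 (pvLy land) 1).foldl (fun d j =>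
        if pvAt land i j = 1 then d.insert (i, j) (i * pvLy land + j) else d) d)
      PySem.Dict.empty =
      (pvAllCells (pvLx land) (pvLy land)).foldl (fun d c =>
        if pvAt land c.1 c.2 = 1 then d.insert c (c.1 * pvLy land + c.2) else d)
      PySem.Dict.empty :=
    pvNestedFold (pvLx land) (pvLy land)
      (fun d c => if pvAt land c.1 c.2 = 1 then d.insert c (c.1 * pvLy land + c.2) else d)
      PySem.Dict.empty
  rw [h1, pvFoldl_ite_filter (pvAllCells (pvLx land) (pvLy land))
    (fun c => pvAt land c.1 c.2 = 1)
    (fun d c => d.insert c (c.1 * pvLy land + c.2)) PySem.Dict.empty]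
  have h2 : ((pvAllCells (pvLx land) (pvLy land)).filter
      (fun c => decide (pvAt land c.1 c.2 = 1))) = pvOilList land := rfl
  rw [h2]
  rw [PySem.Dict.items_foldl_insert_fresh (pvOilList land) (fun c => c)
    (fun c => c.1 * pvLy land + c.2) PySem.Dict.empty
    (fun a _ => PySem.Dict.contains_empty a) (by simpa using pvNodup_oilList land)]
  simp [pvItems_empty, pvIdxOf]

theorem pvPass_spec {land : List (List Int)} {g : (Int × Int) → Int}
    {lab : PySem.Dict (Int × Int) Int} (h : pvShaped land g lab) :
    pvShaped land (pvPassF land g) (pvPass lab).1 ∧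
      ((pvPass lab).2 = true ↔ ∃ c ∈ pvOilList land, ¬ pvPassF land g c = g c) := by
  unfold pvPass
  rw [h, List.foldl_map]
  rw [PySem.List.foldl_congr_mem _ _
    (fun (acc : PySem.Dict (Int × Int) Int × Bool) (c : Int × Int) =>
      (acc.1.insert c (pvPassF land g c), acc.2 || decide (¬ pvPassF land g c = g c))) _
    (by
      intro acc c hc
      have hm : (pvNbrs c).foldl (fun m n =>
          match lab.get? n with
          | some v => if v < m then v else m
          | none => m) (g c) = pvPassF land g c := by
        unfold pvPassF
        apply PySem.List.foldl_congr_mem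
        intro m n _
        rw [pvShaped_get? h]
        by_cases hn : n ∈ pvOilList land
        · simp [hn]
        · simp [hn]
      simp only [hm])]
  rw [pvFoldl_pair (pvOilList land) (fun d c => d.insert c (pvPassF land g c))
    (fun b c => b || decide (¬ pvPassF land g c = g c)) PySem.Dict.empty false]
  constructor
  · unfold pvShaped
    rw [PySem.Dict.items_foldl_insert_fresh (pvOilList land) (fun c => c)
      (fun c => pvPassF land g c) PySem.Dict.empty
      (fun a _ => PySem.Dict.contains_empty a) (by simpa using pvNodup_oilList land)]
    simp [pvItems_empty]
  · rw [pvFoldl_or]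
    simp [List.any_eq_true]

-- ---------- properties of one relaxation step ----------
theorem pvFoldl_dec {α : Type} (l : List α) (f : Int → α → Int) (hf : ∀ m n, f m n ≤ m) :
    ∀ init, l.foldl f init ≤ init := by
  induction l with
  | nil => intro init; exact le_refl _
  | cons a l ih => intro init; exact le_trans (ih (f init a)) (hf init a)

theorem pvPassF_step_le {land : List (List Int)} {g : (Int × Int) → Int} :
    ∀ (m : Int) (n : Int × Int),
      (if n ∈ pvOilList land then (if g n < m then g n else m) else m) ≤ m := by
  intro m n
  split
  · split <;> omega
  · exact le_refl _

theorem pvPassF_le (land : List (List Int)) (g : (Int × Int) → Int) (c : Int × Int) :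
    pvPassF land g c ≤ g c :=
  pvFoldl_dec _ _ pvPassF_step_le (g c)

theorem pvFoldl_le_at {α : Type} (l : List α) (f : Int → α → Int) (hf : ∀ m n, f m n ≤ m)
    {x : α} (B : Int) (hb : ∀ m, f m x ≤ B) (hx : x ∈ l) :
    ∀ init, l.foldl f init ≤ B := by
  induction l with
  | nil => cases hx
  | cons a l ih =>
    intro init
    rcases List.mem_cons.1 hx with hxa | hx'
    · subst hxa
      exact le_trans (pvFoldl_dec l f hf (f init x)) (hb init)
    · exact ih hx' (f init a)

theorem pvPassF_le_nbr {land : List (List Int)} {g : (Int × Int) → Int} {c n : Int × Int}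
    (hn : n ∈ pvNbrs c) (ho : n ∈ pvOilList land) : pvPassF land g c ≤ g n := by
  apply pvFoldl_le_at _ _ pvPassF_step_le (g n) _ hn
  intro m
  simp only [ho, if_pos]
  split <;> omega

theorem pvPassF_mem (land : List (List Int)) (g : (Int × Int) → Int) (c : Int × Int) :
    pvPassF land g c = g c ∨
      ∃ n ∈ pvNbrs c, n ∈ pvOilList land ∧ pvPassF land g c = g n := by
  unfold pvPassF
  generalize hL : pvNbrs c = l
  have main : ∀ (l' : List (Int × Int)) (init : Int),
      (∀ n ∈ l', n ∈ l) →
      (l'.foldl (fun m n => if n ∈ pvOilList land then (if g n < m then g n else m) else m) init = init ∨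
        ∃ n ∈ l, n ∈ pvOilList land ∧
          l'.foldl (fun m n => if n ∈ pvOilList land then (if g n < m then g n else m) else m) init = g n) := by
    intro l'
    induction l' with
    | nil => intro init _; exact Or.inl rfl
    | cons a t ih =>
      intro init hsub
      simp only [List.foldl_cons]
      by_cases ha : a ∈ pvOilList land
      · by_cases hlt : g a < init
        · have := ih (if a ∈ pvOilList land then (if g a < init then g a else init) else init)
            (fun n hn => hsub n (List.mem_cons_of_mem a hn))
          simp only [ha, if_pos, hlt, if_pos] at this ⊢
          rcases this with h | h
          · exact Or.inr ⟨a, hsub a (List.mem_cons_self), ha, h⟩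
          · exact Or.inr h
        · have := ih init (fun n hn => hsub n (List.mem_cons_of_mem a hn))
          simp only [ha, if_pos, hlt, if_false] at this ⊢
          simpa using this
      · have := ih init (fun n hn => hsub n (List.mem_cons_of_mem a hn))
        simp only [ha, if_false] at this ⊢
        simpa using this
  rcases main l (g c) (fun _ hn => hn) with h | h
  · exact Or.inl h
  · exact Or.inr h

-- ---------- the invariant carried through the passes ----------
theorem pvP2_pass {land : List (List Int)} {g : (Int × Int) → Int} (h2 : pvP2 land g) :
    pvP2 land (pvPassF land g) := by
  intro c hc
  rcases pvPassF_mem land g c with he | ⟨n, hn, hno, he⟩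
  · obtain ⟨d, hd, hcd, hv⟩ := h2 c hc
    exact ⟨d, hd, hcd, he ▸ hv⟩
  · obtain ⟨d, hd, hnd, hv⟩ := h2 n hno
    exact ⟨d, hd, Relation.ReflTransGen.head ⟨hc, hno, hn⟩ hnd, he ▸ hv⟩

theorem pvP2_nonneg {land : List (List Int)} {g : (Int × Int) → Int} (h2 : pvP2 land g) :
    ∀ c ∈ pvOilList land, 0 ≤ g c := by
  intro c hc
  obtain ⟨d, hd, _, hv⟩ := h2 c hc
  rw [hv]
  exact pvIdxOf_nonneg hd

theorem pvLoop_spec (land : List (List Int)) :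
    ∀ (fuel : Nat) (lab : PySem.Dict (Int × Int) Int) (g : (Int × Int) → Int),
      pvShaped land g lab → pvP2 land g →
      ((pvOilList land).map (fun c => (g c).toNat)).sum < fuel →
      ∃ G, pvShaped land G (pvLoop fuel lab) ∧ pvP2 land G ∧
        (∀ c ∈ pvOilList land, pvPassF land G c = G c) := by
  intro fuel
  induction fuel with
  | zero => intro lab g _ _ hlt; omega
  | succ fuel ih =>
    intro lab g hsh h2 hlt
    have hpass := pvPass_spec hsh
    simp only [pvLoop]
    by_cases hch : (pvPass lab).2 = true
    · rw [if_pos hch]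
      obtain ⟨w, hw, hne⟩ := hpass.2.1 hch
      have h2' : pvP2 land (pvPassF land g) := pvP2_pass h2
      apply ih (pvPass lab).1 (pvPassF land g) hpass.1 h2'
      have hsum : ((pvOilList land).map (fun c => (pvPassF land g c).toNat)).sum <
          ((pvOilList land).map (fun c => (g c).toNat)).sum := by
        apply List.sum_lt_sum
        · intro c _
          have := pvPassF_le land g c
          omega
        · refine ⟨w, hw, ?_⟩
          have hle := pvPassF_le land g w
          have hnn := pvP2_nonneg h2' w hw
          omega
      omega
    · rw [if_neg hch]
      refine ⟨g, ?_, h2, ?_⟩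
      · unfold pvShaped
        rw [hpass.1]
        apply List.map_congr_left
        intro c hc
        have : ¬ ¬ pvPassF land g c = g c := fun hne => hch (hpass.2.2 ⟨c, hc, hne⟩)
        simp at this
        rw [this]
      · intro c hc
        have : ¬ ¬ pvPassF land g c = g c := fun hne => hch (hpass.2.2 ⟨c, hc, hne⟩)
        simpa using this

theorem pvP2_init (land : List (List Int)) : pvP2 land (pvIdxOf land) :=
  fun c hc => ⟨c, hc, Relation.ReflTransGen.refl, rfl⟩

theorem pvG_main (land : List (List Int)) :
    ∃ G, pvShaped land G (pvLabD land) ∧ pvP2 land G ∧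
      (∀ c ∈ pvOilList land, pvPassF land G c = G c) ∧
      (∀ c ∈ pvOilList land, pvG land c = G c) := by
  have hsh := pvLab0_shaped land
  have hfuel : ((pvOilList land).map (fun c => (pvIdxOf land c).toNat)).sum <
      pvFuel (pvLab0 land (pvLx land) (pvLy land)) := by
    unfold pvFuel
    rw [pvShaped_values hsh, List.foldl_map,
      PySem.List.foldl_add_nat _ (fun c => (pvIdxOf land c).toNat) 0]
    omega
  obtain ⟨G, h1, h2, h3⟩ := pvLoop_spec land (pvFuel (pvLab0 land (pvLx land) (pvLy land)))
    (pvLab0 land (pvLx land) (pvLy land)) (pvIdxOf land) hsh (pvP2_init land) hfuel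
  refine ⟨G, h1, h2, h3, ?_⟩
  intro c hc
  exact pvShaped_getD h1 hc (-1)

theorem pvG_adj {land : List (List Int)} {c d : Int × Int} (h : pvAdj land c d) :
    pvG land c = pvG land d := by
  obtain ⟨G, _, _, hfix, hG⟩ := pvG_main land
  obtain ⟨hc, hd, hnb⟩ := h
  rw [hG c hc, hG d hd]
  have h1 : G c ≤ G d := by
    rw [← hfix c hc]; exact pvPassF_le_nbr hnb hd
  have h2 : G d ≤ G c := by
    rw [← hfix d hd]; exact pvPassF_le_nbr (pvNbrs_symm.1 hnb) hc
  omega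

theorem pvG_conn {land : List (List Int)} {c d : Int × Int} (h : pvConn land c d) :
    pvG land c = pvG land d := by
  induction h with
  | refl => rfl
  | tail _ hadj ih => exact ih.trans (pvG_adj hadj)

theorem pvG_bridge {land : List (List Int)} {c c' : Int × Int}
    (hc : c ∈ pvOilList land) (hc' : c' ∈ pvOilList land) :
    pvG land c = pvG land c' ↔ pvConn land c c' := by
  constructor
  · intro h
    obtain ⟨G, _, h2, _, hG⟩ := pvG_main land
    obtain ⟨d, hd, hcd, hv⟩ := h2 c hc
    obtain ⟨d', hd', hcd', hv'⟩ := h2 c' hc'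
    rw [hG c hc] at h; rw [hG c' hc'] at h
    have : d = d' := pvIdxOf_inj hd hd' (by rw [← hv, ← hv', h])
    subst this
    exact Relation.ReflTransGen.trans hcd (pvConn_symm hcd')
  · exact pvG_conn

-- ---------- A side: the BFS invariant ----------
theorem pvNbr_of_delta {t d : Int × Int} (hd : d ∈ pvDeltas) :
    (t.1 + d.1, t.2 + d.2) ∈ pvNbrs t := by
  simp only [pvDeltas, List.mem_cons, List.not_mem_nil, or_false] at hd
  rcases hd with rfl | rfl | rfl | rfl <;> simp [pvNbrs, Prod.ext_iff] <;> omega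

theorem pvDelta_of_nbr {t n : Int × Int} (hn : n ∈ pvNbrs t) :
    ∃ d ∈ pvDeltas, n = (t.1 + d.1, t.2 + d.2) := by
  simp only [pvNbrs, List.mem_cons, List.not_mem_nil, or_false] at hn
  rcases hn with rfl | rfl | rfl | rfl
  · exact ⟨(-1, 0), by simp [pvDeltas], by simp [Prod.ext_iff]; omega⟩
  · exact ⟨(1, 0), by simp [pvDeltas], by simp⟩
  · exact ⟨(0, -1), by simp [pvDeltas], by simp [Prod.ext_iff]; omega⟩
  · exact ⟨(0, 1), by simp [pvDeltas], by simp⟩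

-- the state invariant of A's inner `for d in delta` loop, relative to the popped cell t
def pvCore (land : List (List Int)) (visit0 : List (Int × Int)) (seed t : Int × Int)
    (st : List (Int × Int) × List (Int × Int) × Int × List Int) : Prop :=
  ∃ V : List (Int × Int),
    st.2.1 = V ++ visit0 ∧ V.Nodup ∧ st.1.Nodup ∧ (∀ c ∈ st.1, c ∈ V) ∧
    t ∉ st.1 ∧ t ∈ V ∧ seed ∈ V ∧
    (∀ c ∈ V, c ∈ pvOilList land ∧ pvConn land seed c ∧ c ∉ visit0) ∧
    st.2.2.1 = (V.length : Int) ∧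
    (∀ y, y ∈ st.2.2.2 ↔ ∃ c ∈ V, c.2 = y) ∧
    (∀ c ∈ V, c ∉ st.1 → c ≠ t → ∀ e, pvAdj land c e → e ∈ st.2.1)

theorem pvStep_core {land : List (List Int)} {visit0 : List (Int × Int)} {seed t : Int × Int}
    {st : List (Int × Int) × List (Int × Int) × Int × List Int} {d : Int × Int}
    (hd : d ∈ pvDeltas) (h : pvCore land visit0 seed t st) :
    pvCore land visit0 seed t (pvStep land (pvLx land) (pvLy land) t st d) ∧
    (∀ c ∈ st.2.1, c ∈ (pvStep land (pvLx land) (pvLy land) t st d).2.1) ∧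
    ((t.1 + d.1, t.2 + d.2) ∈ pvOilList land →
      (t.1 + d.1, t.2 + d.2) ∈ (pvStep land (pvLx land) (pvLy land) t st d).2.1) := by
  obtain ⟨V, hv, hnV, hnq, hqV, htq, htV, hsV, hall, hch, hli, hcl⟩ := h
  simp only [pvStep]
  split
  next hcond =>
    obtain ⟨h1, h2, h3, h4, h5, h6⟩ := hcond
    set n : Int × Int := (t.1 + d.1, t.2 + d.2) with hn
    have hnoil : n ∈ pvOilList land := pvMem_oilList.2 ⟨⟨h1, h2, h3, h4⟩, h5⟩
    have hnV' : n ∉ V := fun hmem => h6 (by rw [hv]; exact List.mem_append_left _ hmem)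
    have hnv0 : n ∉ visit0 := fun hmem => h6 (by rw [hv]; exact List.mem_append_right _ hmem)
    have hnq' : n ∉ st.1 := fun hmem => hnV' (hqV n hmem)
    have htn : t ≠ n := by
      intro he; exact h6 (by rw [hv, ← he]; exact List.mem_append_left _ htV)
    have hconn : pvConn land seed n :=
      Relation.ReflTransGen.tail (hall t htV).2.1
        ⟨(hall t htV).1, hnoil, pvNbr_of_delta (t := t) hd⟩
    refine ⟨⟨n :: V, ?_, ?_, ?_, ?_, ?_, ?_, ?_, ?_, ?_, ?_, ?_⟩, ?_, ?_⟩
    · simp only [hv]; rfl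
    · exact List.Nodup.cons hnV' hnV
    · refine List.Nodup.append hnq (List.nodup_singleton n) ?_
      intro a ha hb
      simp only [List.mem_singleton] at hb
      exact hnq' (hb ▸ ha)
    · intro c hc
      rcases List.mem_append.1 hc with hc1 | hc2
      · exact List.mem_cons_of_mem n (hqV c hc1)
      · simp only [List.mem_singleton] at hc2
        exact hc2 ▸ List.mem_cons_self
    · intro hmem
      rcases List.mem_append.1 hmem with hc1 | hc2
      · exact htq hc1
      · simp only [List.mem_singleton] at hc2
        exact htn hc2
    · exact List.mem_cons_of_mem n htV
    · exact List.mem_cons_of_mem n hsV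
    · intro c hc
      rcases List.mem_cons.1 hc with hrfl | hc'
      · exact hrfl ▸ ⟨hnoil, hconn, hnv0⟩
      · exact hall c hc'
    · simp only [hch, List.length_cons]
      push_cast
      ring
    · intro y
      simp only [List.mem_append, List.mem_singleton, hli]
      constructor
      · rintro (⟨c, hc, hcy⟩ | hy)
        · exact ⟨c, List.mem_cons_of_mem n hc, hcy⟩
        · exact ⟨n, List.mem_cons_self, hy.symm⟩
      · rintro ⟨c, hc, hcy⟩
        rcases List.mem_cons.1 hc with hrfl | hc'
        · exact Or.inr (by rw [← hcy, hrfl])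
        · exact Or.inl ⟨c, hc', hcy⟩
    · intro c hc hcq hct e hadj
      rcases List.mem_cons.1 hc with hrfl | hc'
      · exact absurd (List.mem_append_right st.1 (by simp [hrfl])) hcq
      · exact List.mem_cons_of_mem n
          (hcl c hc' (fun hq => hcq (List.mem_append_left _ hq)) hct e hadj)
    · exact fun c hc => List.mem_cons_of_mem n hc
    · exact fun _ => List.mem_cons_self
  next hcond =>
    refine ⟨⟨V, hv, hnV, hnq, hqV, htq, htV, hsV, hall, hch, hli, hcl⟩, fun c hc => hc, ?_⟩
    intro hoil
    have hb := pvMem_oilList.1 hoil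
    by_contra hnmem
    exact hcond ⟨hb.1.1, hb.1.2.1, hb.1.2.2.1, hb.1.2.2.2, hb.2, hnmem⟩

theorem pvFold_core {land : List (List Int)} {visit0 : List (Int × Int)} {seed t : Int × Int} :
    ∀ (ds : List (Int × Int)), (∀ d ∈ ds, d ∈ pvDeltas) →
    ∀ {st : List (Int × Int) × List (Int × Int) × Int × List Int}, pvCore land visit0 seed t st →
    pvCore land visit0 seed t (ds.foldl (pvStep land (pvLx land) (pvLy land) t) st) ∧
    (∀ c ∈ st.2.1, c ∈ (ds.foldl (pvStep land (pvLx land) (pvLy land) t) st).2.1) ∧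
    (∀ d ∈ ds, (t.1 + d.1, t.2 + d.2) ∈ pvOilList land →
      (t.1 + d.1, t.2 + d.2) ∈ (ds.foldl (pvStep land (pvLx land) (pvLy land) t) st).2.1) := by
  intro ds
  induction ds with
  | nil =>
    intro _ st h
    exact ⟨h, fun c hc => hc, fun d hd => absurd hd (List.not_mem_nil)⟩
  | cons d ds ih =>
    intro hds st h
    have hstep := pvStep_core (d := d) (hds d List.mem_cons_self) h
    have hrest := ih (fun e he => hds e (List.mem_cons_of_mem d he)) hstep.1
    simp only [List.foldl_cons]
    refine ⟨hrest.1, ?_, ?_⟩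
    · exact fun c hc => hrest.2.1 c (hstep.2.1 c hc)
    · intro e he hoil
      rcases List.mem_cons.1 he with hrfl | he'
      · exact hrest.2.1 _ (hrfl ▸ hstep.2.2 (hrfl ▸ hoil))
      · exact hrest.2.2 e he' hoil

-- the state invariant of A's `while q` loop
def pvInvB (land : List (List Int)) (visit0 : List (Int × Int)) (seed : Int × Int)
    (q visit : List (Int × Int)) (check : Int) (li : List Int) : Prop :=
  ∃ V : List (Int × Int),
    visit = V ++ visit0 ∧ V.Nodup ∧ q.Nodup ∧ (∀ c ∈ q, c ∈ V) ∧ seed ∈ V ∧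
    (∀ c ∈ V, c ∈ pvOilList land ∧ pvConn land seed c ∧ c ∉ visit0) ∧
    check = (V.length : Int) ∧
    (∀ y, y ∈ li ↔ ∃ c ∈ V, c.2 = y) ∧
    (∀ c ∈ V, c ∉ q → ∀ e, pvAdj land c e → e ∈ visit)

theorem pvBFS_inv {land : List (List Int)} {visit0 : List (Int × Int)} {seed : Int × Int} :
    ∀ (q visit : List (Int × Int)) (check : Int) (li : List Int),
    pvInvB land visit0 seed q visit check li →
    ∃ V : List (Int × Int),
      (pvBFS land (pvLx land) (pvLy land) q visit check li).1 = V ++ visit0 ∧ V.Nodup ∧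
      seed ∈ V ∧
      (∀ c ∈ V, c ∈ pvOilList land ∧ pvConn land seed c ∧ c ∉ visit0) ∧
      (pvBFS land (pvLx land) (pvLy land) q visit check li).2.1 = (V.length : Int) ∧
      (∀ y, y ∈ (pvBFS land (pvLx land) (pvLy land) q visit check li).2.2 ↔ ∃ c ∈ V, c.2 = y) ∧
      (∀ c ∈ V, ∀ e, pvAdj land c e → e ∈ V ++ visit0) := by
  intro q visit check li
  induction q, visit, check, li using pvBFS.induct (land := land) (lx := pvLx land) (ly := pvLy land) with
  | case1 visit check li =>
    intro h
    obtain ⟨V, hv, hnV, _, _, hsV, hall, hch, hli, hcl⟩ := h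
    rw [pvBFS]
    refine ⟨V, hv, hnV, hsV, hall, hch, hli, ?_⟩
    intro c hc e hadj
    rw [← hv]
    exact hcl c hc (List.not_mem_nil) e hadj
  | case2 visit check li t rest st ih =>
    intro h
    obtain ⟨V, hv, hnV, hnq, hqV, hsV, hall, hch, hli, hcl⟩ := h
    have hcore : pvCore land visit0 seed t (rest, visit, check, li) := by
      refine ⟨V, hv, hnV, (List.nodup_cons.1 hnq).2, fun c hc => hqV c (List.mem_cons_of_mem t hc),
        (List.nodup_cons.1 hnq).1, hqV t List.mem_cons_self, hsV, hall, hch, hli, ?_⟩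
      intro c hc hcq hct e hadj
      exact hcl c hc (by simp [hcq, hct]) e hadj
    have hfold := pvFold_core pvDeltas (fun d hd => hd) hcore
    obtain ⟨V', hv', hnV', hnq', hqV', htq', htV', hsV', hall', hch', hli', hcl'⟩ := hfold.1
    rw [pvBFS]
    apply ih
    refine ⟨V', hv', hnV', hnq', hqV', hsV', hall', hch', hli', ?_⟩
    intro c hc hcq e hadj
    by_cases hct : c = t
    · subst hct
      obtain ⟨de, hde, hrfl⟩ := pvDelta_of_nbr hadj.2.2
      have : e ∈ (pvDeltas.foldl (pvStep land (pvLx land) (pvLy land) c) (rest, visit, check, li)).2.1 :=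
        hrfl ▸ hfold.2.2 de hde (hrfl ▸ hadj.2.1)
      exact this
    · exact hcl' c hc hcq hct e hadj

theorem pvBFS_full {land : List (List Int)} {visit0 : List (Int × Int)} {seed : Int × Int}
    (h0 : ∀ c ∈ visit0, ∀ e, pvAdj land c e → e ∈ visit0)
    (hs : seed ∈ pvOilList land) (hs0 : seed ∉ visit0) :
    ∃ V : List (Int × Int),
      (pvBFS land (pvLx land) (pvLy land) [seed] (seed :: visit0) 1 [seed.2]).1 = V ++ visit0 ∧
      V.Nodup ∧
      (∀ c, c ∈ V ↔ c ∈ pvOilList land ∧ pvConn land seed c) ∧ (∀ x ∈ V, x ∉ visit0) ∧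
      (pvBFS land (pvLx land) (pvLy land) [seed] (seed :: visit0) 1 [seed.2]).2.1 = (V.length : Int) ∧
      (∀ y, y ∈ (pvBFS land (pvLx land) (pvLy land) [seed] (seed :: visit0) 1 [seed.2]).2.2 ↔
        ∃ c ∈ V, c.2 = y) := by
  have hinit : pvInvB land visit0 seed [seed] (seed :: visit0) 1 [seed.2] := by
    refine ⟨[seed], rfl, List.nodup_singleton seed, List.nodup_singleton seed,
      fun c hc => hc, List.mem_singleton.2 rfl, ?_, by simp, ?_, ?_⟩
    · intro c hc
      rw [List.mem_singleton] at hc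
      subst hc
      exact ⟨hs, Relation.ReflTransGen.refl, hs0⟩
    · intro y
      simp [eq_comm]
    · intro c hc hcq
      rw [List.mem_singleton] at hc
      exact absurd (List.mem_singleton.2 hc) hcq
  obtain ⟨V, hv, hnV, hsV, hall, hch, hli, hcl⟩ := pvBFS_inv _ _ _ _ hinit
  refine ⟨V, hv, hnV, ?_, fun x hx => (hall x hx).2.2, hch, hli⟩
  intro c
  constructor
  · exact fun hc => ⟨(hall c hc).1, (hall c hc).2.1⟩
  · rintro ⟨hcoil, hconn⟩
    clear hcoil
    induction hconn with
    | refl => exact hsV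
    | tail hcb hadj ihb =>
      have hnext := hcl _ ihb _ hadj
      rcases List.mem_append.1 hnext with h | h
      · exact h
      · exact absurd (h0 _ h _ (pvAdj_symm hadj)) (hall _ ihb).2.2

-- ---------- the per-column sums ----------
def pvTouchB (land : List (List Int)) (c : Int × Int) (j : Int) : Bool :=
  (pvOilList land).any (fun c' => c'.2 == j && pvG land c' == pvG land c)

def pvWInv (land : List (List Int)) (W : List (Int × Int)) : Prop :=
  W.Nodup ∧ (∀ c ∈ W, c ∈ pvOilList land) ∧ (∀ c ∈ W, ∀ e, pvAdj land c e → e ∈ W)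

def pvSInv (land : List (List Int)) (W : List (Int × Int)) (s : List Int) : Prop :=
  s.length = (pvLy land).toNat ∧ ∀ j : Int, 0 ≤ j → j < pvLy land →
    PySem.List.pyGetD s j 0 = (W.countP (fun c => pvTouchB land c j) : Int)

theorem pvBump_fold (C v : Int) :
    ∀ (ls : List Int), ls.Nodup → (∀ l ∈ ls, 0 ≤ l ∧ l < C) →
    ∀ (s : List Int), s.length = C.toNat →
    (ls.foldl (fun s l => PySem.List.pySetD s l (PySem.List.pyGetD s l 0 + v)) s).length = C.toNat ∧
    (∀ j : Int, 0 ≤ j → j < C →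
      PySem.List.pyGetD (ls.foldl (fun s l => PySem.List.pySetD s l (PySem.List.pyGetD s l 0 + v)) s) j 0 =
        PySem.List.pyGetD s j 0 + (if j ∈ ls then v else 0)) := by
  intro ls
  induction ls with
  | nil =>
    intro _ _ s hlen
    exact ⟨hlen, fun j _ _ => by simp⟩
  | cons l ls ih =>
    intro hnd hb s hlen
    have hl := hb l List.mem_cons_self
    have hset : ∀ (m : Int), 0 ≤ m → m < C →
        PySem.List.pyGetD (PySem.List.pySetD s l (PySem.List.pyGetD s l 0 + v)) m 0 =
          if m = l then PySem.List.pyGetD s l 0 + v else PySem.List.pyGetD s m 0 := by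
      intro m hm0 hmC
      have e1 : l = ((l.toNat : Nat) : Int) := by omega
      have e2 : m = ((m.toNat : Nat) : Int) := by omega
      rw [e1, e2, PySem.List.pyGetD_pySetD_natCast s l.toNat m.toNat _ 0 (by omega)]
      by_cases hml : m.toNat = l.toNat
      · rw [if_pos hml, if_pos (by omega), ← e1]
      · rw [if_neg hml, if_neg (by omega), ← e2]
    have hlen' : (PySem.List.pySetD s l (PySem.List.pyGetD s l 0 + v)).length = C.toNat := by
      rw [PySem.List.length_pySetD]; exact hlen
    obtain ⟨hL, hG⟩ := ih (List.nodup_cons.1 hnd).2 (fun x hx => hb x (List.mem_cons_of_mem l hx))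
      _ hlen'
    simp only [List.foldl_cons]
    refine ⟨hL, ?_⟩
    intro j hj0 hjC
    rw [hG j hj0 hjC, hset j hj0 hjC]
    by_cases hjl : j = l
    · subst hjl
      have : j ∉ ls := (List.nodup_cons.1 hnd).1
      simp [this]
    · have hmem : (j ∈ l :: ls) = (j ∈ ls) := by simp [List.mem_cons, hjl]
      simp only [if_neg hjl, hmem]

theorem pvTouchB_congr {land : List (List Int)} {c c' : Int × Int} (j : Int)
    (h : pvG land c = pvG land c') : pvTouchB land c j = pvTouchB land c' j := by
  unfold pvTouchB
  rw [h]

theorem pvOuterStep_inv {land : List (List Int)} {W : List (Int × Int)} {s : List Int}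
    (hW : pvWInv land W) (hS : pvSInv land W s) (c : Int × Int)
    (hcg : c ∈ pvAllCells (pvLx land) (pvLy land)) :
    pvWInv land (pvOuterStep land (pvLx land) (pvLy land) (W, s) c).1 ∧
    pvSInv land (pvOuterStep land (pvLx land) (pvLy land) (W, s) c).1
      (pvOuterStep land (pvLx land) (pvLy land) (W, s) c).2 ∧
    (∀ x ∈ W, x ∈ (pvOuterStep land (pvLx land) (pvLy land) (W, s) c).1) ∧
    (c ∈ pvOilList land → c ∈ (pvOuterStep land (pvLx land) (pvLy land) (W, s) c).1) := by
  unfold pvOuterStep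
  split
  next hcond =>
    obtain ⟨hat, hnW⟩ := hcond
    have hcoil : c ∈ pvOilList land := pvMem_oilList.2 ⟨pvMem_allCells.1 hcg, hat⟩
    obtain ⟨V, hv1, hnV, hVchar, hVdis, hcheck, hli⟩ :=
      pvBFS_full (seed := c) (visit0 := W) hW.2.2 hcoil hnW
    have hVoil : ∀ x ∈ V, x ∈ pvOilList land := fun x hx => ((hVchar x).1 hx).1
    have hVconn : ∀ x ∈ V, pvConn land c x := fun x hx => ((hVchar x).1 hx).2
    have hGV : ∀ x ∈ V, pvG land x = pvG land c :=
      fun x hx => (pvG_conn (pvConn_symm (hVconn x hx)))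
    have hcV : c ∈ V := (hVchar c).2 ⟨hcoil, Relation.ReflTransGen.refl⟩
    have hWnew : pvWInv land (V ++ W) := by
      refine ⟨List.Nodup.append hnV hW.1 (fun a ha hb => hVdis a ha hb), ?_, ?_⟩
      · intro x hx
        rcases List.mem_append.1 hx with h | h
        · exact hVoil x h
        · exact hW.2.1 x h
      · intro x hx e hadj
        rcases List.mem_append.1 hx with h | h
        · exact List.mem_append_left _ ((hVchar e).2
            ⟨hadj.2.1, Relation.ReflTransGen.tail (hVconn x h) hadj⟩)
        · exact List.mem_append_right _ (hW.2.2 x h e hadj)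
    constructor
    · rw [hv1]; exact hWnew
    constructor
    · -- the s-array update
      set r := pvBFS land (pvLx land) (pvLy land) [c] (c :: W) 1 [c.2] with hr
      set ls : List Int := PySem.Set.ofList r.2.2 with hls
      have hlsnd : ls.Nodup := PySem.Set.nodup_ofList _
      have hlsmem : ∀ y, y ∈ ls ↔ ∃ x ∈ V, x.2 = y := by
        intro y
        rw [hls, PySem.Set.mem_ofList]
        exact hli y
      have hlsb : ∀ l ∈ ls, 0 ≤ l ∧ l < pvLy land := by
        intro l hl
        obtain ⟨x, hx, hxy⟩ := (hlsmem l).1 hl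
        obtain ⟨⟨_, _, h3, h4⟩, _⟩ := pvMem_oilList.1 (hVoil x hx)
        omega
      obtain ⟨hL, hGet⟩ := pvBump_fold (pvLy land) r.2.1 ls hlsnd hlsb s hS.1
      refine ⟨hL, ?_⟩
      intro j hj0 hjC
      rw [hGet j hj0 hjC, hS.2 j hj0 hjC, hv1, List.countP_append]
      have htouch : ∀ x ∈ V, pvTouchB land x j = pvTouchB land c j :=
        fun x hx => pvTouchB_congr j (hGV x hx)
      have hiff : pvTouchB land c j = true ↔ j ∈ ls := by
        constructor
        · intro ht
          obtain ⟨c', hc', hprop⟩ := List.any_eq_true.1 ht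
          rw [Bool.and_eq_true, beq_iff_eq, beq_iff_eq] at hprop
          have hconn : pvConn land c c' :=
            pvConn_symm ((pvG_bridge hc' hcoil).1 hprop.2)
          exact (hlsmem j).2 ⟨c', (hVchar c').2 ⟨hc', hconn⟩, hprop.1⟩
        · intro hj
          obtain ⟨x, hx, hxy⟩ := (hlsmem j).1 hj
          refine List.any_eq_true.2 ⟨x, hVoil x hx, ?_⟩
          rw [Bool.and_eq_true, beq_iff_eq, beq_iff_eq]
          exact ⟨hxy, hGV x hx⟩
      have hcount : V.countP (fun x => pvTouchB land x j) =
          if pvTouchB land c j = true then V.length else 0 := by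
        by_cases hcj : pvTouchB land c j = true
        · rw [if_pos hcj]
          exact List.countP_eq_length.2 (fun a ha => (htouch a ha).trans hcj)
        · rw [if_neg hcj]
          exact List.countP_eq_zero.2 (fun a ha hpa => hcj ((htouch a ha).symm.trans hpa))
      rw [hcount, hcheck]
      by_cases hcj : pvTouchB land c j = true
      · rw [if_pos ((hiff).1 hcj), if_pos hcj]
        push_cast
        ring
      · rw [if_neg (fun hj => hcj ((hiff).2 hj)), if_neg hcj]
        push_cast
        ring
    constructor
    · intro x hx
      rw [hv1]
      exact List.mem_append_right _ hx
    · intro _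
      rw [hv1]
      exact List.mem_append_left _ hcV
  next hcond =>
    refine ⟨hW, hS, fun x hx => hx, ?_⟩
    intro hcoil
    have hat : pvAt land c.1 c.2 = 1 := (pvMem_oilList.1 hcoil).2
    by_contra hnW
    exact hcond ⟨hat, fun hm => hnW hm⟩

theorem pvOuterFold {land : List (List Int)} :
    ∀ (L : List (Int × Int)), (∀ c ∈ L, c ∈ pvAllCells (pvLx land) (pvLy land)) →
    ∀ (W : List (Int × Int)) (s : List Int),
    pvWInv land W → pvSInv land W s →
    pvWInv land (L.foldl (pvOuterStep land (pvLx land) (pvLy land)) (W, s)).1 ∧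
    pvSInv land (L.foldl (pvOuterStep land (pvLx land) (pvLy land)) (W, s)).1
      (L.foldl (pvOuterStep land (pvLx land) (pvLy land)) (W, s)).2 ∧
    (∀ x ∈ W, x ∈ (L.foldl (pvOuterStep land (pvLx land) (pvLy land)) (W, s)).1) ∧
    (∀ c ∈ L, c ∈ pvOilList land → c ∈ (L.foldl (pvOuterStep land (pvLx land) (pvLy land)) (W, s)).1) := by
  intro L
  induction L with
  | nil =>
    intro _ W s hW hS
    exact ⟨hW, hS, fun x hx => hx, fun c hc => absurd hc List.not_mem_nil⟩
  | cons c L ih =>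
    intro hLg W s hW hS
    obtain ⟨hW', hS', hmono, hcin⟩ := pvOuterStep_inv hW hS c (hLg c List.mem_cons_self)
    simp only [List.foldl_cons]
    have hstep : pvOuterStep land (pvLx land) (pvLy land) (W, s) c =
        ((pvOuterStep land (pvLx land) (pvLy land) (W, s) c).1,
         (pvOuterStep land (pvLx land) (pvLy land) (W, s) c).2) := rfl
    rw [hstep]
    obtain ⟨h1, h2, h3, h4⟩ := ih (fun x hx => hLg x (List.mem_cons_of_mem c hx)) _ _ hW' hS'
    refine ⟨h1, h2, fun x hx => h3 x (hmono x hx), ?_⟩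
    intro e he heoil
    rcases List.mem_cons.1 he with hrfl | he'
    · subst hrfl
      exact h3 e (hcin heoil)
    · exact h4 e he' heoil

-- ---------- assembling both results ----------
theorem pvFoldl_count {α : Type} (l : List α) (p : α → Bool) (t0 : Int) :
    l.foldl (fun t x => if p x = true then t + 1 else t) t0 = t0 + (l.countP p : Int) := by
  induction l generalizing t0 with
  | nil => simp
  | cons x l ih =>
    by_cases hx : p x = true
    · simp [hx, ih]
      ring
    · simp [hx, ih]

theorem pvMax_fold_eq (l : List Int) (hne : l ≠ []) (hnn : ∀ x ∈ l, 0 ≤ x) :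
    (PySem.List.max? l (fun x => x)).getD 0 = l.foldl (fun b x => max b x) 0 := by
  cases l with
  | nil => exact absurd rfl hne
  | cons x t =>
    rw [PySem.List.max?_id_cons]
    simp only [Option.getD_some, List.foldl_cons]
    have : max 0 x = x := max_eq_right (hnn x List.mem_cons_self)
    rw [this]

theorem pvSolution_B (land : List (List Int)) :
    solution_alt land = (PySem.List.pyRange 0 (pvLy land) 1).foldl
      (fun best j => max best (((pvOilList land).countP (fun c => pvTouchB land c j) : Int))) 0 := by
  obtain ⟨G, hsh, _, _, hGeq⟩ := pvG_main land
  have h0 : solution_alt land = (PySem.List.pyRange 0 (pvLy land) 1).foldl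
      (fun best j =>
        let collabels := (PySem.List.pyRange 0 (pvLx land) 1).foldl (fun s i =>
            match (pvLabD land).get? (i, j) with
            | some v => PySem.Set.add s v
            | none => s) PySem.Set.empty
        let total := (pvLabD land).values.foldl
          (fun t v => if collabels.contains v then t + 1 else t) (0 : Int)
        max best total) 0 := rfl
  rw [h0]
  apply PySem.List.foldl_congr_mem
  intro best j hj
  dsimp only
  congr 1
  -- the column label set
  have hcol : ∀ v : Int, (v ∈ (PySem.List.pyRange 0 (pvLx land) 1).foldl (fun s i =>
      match (pvLabD land).get? (i, j) with
      | some v => PySem.Set.add s v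
      | none => s) PySem.Set.empty) ↔ ∃ x ∈ pvOilList land, x.2 = j ∧ G x = v := by
    intro v
    rw [PySem.List.foldl_congr_mem _ _
      (fun (s : PySem.Set Int) (i : Int) =>
        if (i, j) ∈ pvOilList land then PySem.Set.add s (G (i, j)) else s) _
      (by
        intro s i _
        rw [pvShaped_get? hsh]
        by_cases hm : (i, j) ∈ pvOilList land
        · simp [hm]
        · simp [hm])]
    rw [pvFoldl_ite_filter (PySem.List.pyRange 0 (pvLx land) 1)
      (fun i => (i, j) ∈ pvOilList land) (fun s i => PySem.Set.add s (G (i, j))) PySem.Set.empty]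
    rw [PySem.Set.mem_foldl_add]
    constructor
    · rintro (hv | ⟨i, hi, rfl⟩)
      · exact absurd hv (List.not_mem_nil)
      · rw [List.mem_filter, decide_eq_true_iff] at hi
        exact ⟨(i, j), hi.2, rfl, rfl⟩
    · rintro ⟨x, hx, hxj, rfl⟩
      refine Or.inr ⟨x.1, ?_, by rw [show (x.1, j) = x from Prod.ext rfl hxj.symm]⟩
      rw [List.mem_filter, decide_eq_true_iff]
      obtain ⟨⟨hb1, hb2, _, _⟩, _⟩ := pvMem_oilList.1 hx
      constructor
      · rw [PySem.List.mem_pyRange_one]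
        exact ⟨hb1, hb2⟩
      · rw [show (x.1, j) = x from Prod.ext rfl hxj.symm]
        exact hx
  -- the count of cells whose label occurs in column j
  rw [pvShaped_values hsh, List.foldl_map, pvFoldl_count]
  have : (pvOilList land).countP (fun c =>
      ((PySem.List.pyRange 0 (pvLx land) 1).foldl (fun s i =>
        match (pvLabD land).get? (i, j) with
        | some v => PySem.Set.add s v
        | none => s) PySem.Set.empty).contains (G c)) =
      (pvOilList land).countP (fun c => pvTouchB land c j) := by
    apply List.countP_congr
    intro c hc
    rw [PySem.Set.contains]
    constructor
    · intro h
      have hmem := (hcol (G c)).1 (by simpa using h)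
      obtain ⟨x, hx, hxj, hGx⟩ := hmem
      refine List.any_eq_true.2 ⟨x, hx, ?_⟩
      rw [Bool.and_eq_true, beq_iff_eq, beq_iff_eq]
      exact ⟨hxj, by rw [hGeq x hx, hGeq c hc, hGx]⟩
    · intro h
      obtain ⟨x, hx, hprop⟩ := List.any_eq_true.1 h
      rw [Bool.and_eq_true, beq_iff_eq, beq_iff_eq] at hprop
      have : G x = G c := by rw [← hGeq x hx, ← hGeq c hc, hprop.2]
      simpa using (hcol (G c)).2 ⟨x, hx, hprop.1, this⟩
  rw [this]
  omega

theorem pvSolution_A (land : List (List Int)) (hC : 0 < pvLy land) :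
    solution land = (PySem.List.max? ((PySem.List.pyRange 0 (pvLy land) 1).map
      (fun j => ((pvOilList land).countP (fun c => pvTouchB land c j) : Int)))
      (fun x => x)).getD 0 := by
  have h0 : solution land = (PySem.List.max?
      ((PySem.List.pyRange 0 (pvLx land) 1).foldl (fun st i =>
        (PySem.List.pyRange 0 (pvLy land) 1).foldl
          (fun st j => pvOuterStep land (pvLx land) (pvLy land) st (i, j)) st)
        ([], List.replicate (pvLy land).toNat 0)).2 (fun x => x)).getD 0 := rfl
  rw [h0, pvNestedFold (pvLx land) (pvLy land) (pvOuterStep land (pvLx land) (pvLy land))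
    ([], List.replicate (pvLy land).toNat 0)]
  have hS0 : pvSInv land [] (List.replicate (pvLy land).toNat 0) := by
    refine ⟨List.length_replicate, ?_⟩
    intro j hj0 hjC
    have e2 : j = ((j.toNat : Nat) : Int) := by omega
    rw [e2, PySem.List.pyGetD_natCast]
    simp [List.getD_eq_getElem?_getD, show j.toNat < (pvLy land).toNat by omega]
  obtain ⟨hWf, hSf, _, hall⟩ := pvOuterFold (pvAllCells (pvLx land) (pvLy land))
    (fun x hx => hx) [] (List.replicate (pvLy land).toNat 0)
    ⟨List.nodup_nil, fun c hc => absurd hc List.not_mem_nil, fun c hc => absurd hc List.not_mem_nil⟩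
    hS0
  set res := (pvAllCells (pvLx land) (pvLy land)).foldl
    (pvOuterStep land (pvLx land) (pvLy land)) ([], List.replicate (pvLy land).toNat 0) with hres
  have hperm : res.1.Perm (pvOilList land) := by
    apply List.perm_of_nodup_nodup_toFinset_eq hWf.1 (pvNodup_oilList land)
    ext x
    simp only [List.mem_toFinset]
    constructor
    · exact fun hx => hWf.2.1 x hx
    · intro hx
      exact hall x (List.mem_of_mem_filter hx) hx
  have hmapeq : res.2 = (PySem.List.pyRange 0 (pvLy land) 1).map
      (fun j => ((pvOilList land).countP (fun c => pvTouchB land c j) : Int)) := by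
    apply List.ext_getElem
    · rw [hSf.1, List.length_map, PySem.List.length_pyRange_one]
      omega
    · intro k hk1 hk2
      have hkC : (k : Int) < pvLy land := by
        rw [hSf.1] at hk1
        omega
      have hgd : PySem.List.pyGetD res.2 (k : Int) 0 = res.2[k] := by
        rw [PySem.List.pyGetD_eq_getElem res.2 0 (by omega) (by omega)]
        simp
      rw [← hgd, hSf.2 (k : Int) (by omega) hkC]
      rw [List.getElem_map, PySem.List.getElem_pyRange_one]
      rw [List.Perm.countP_eq _ hperm]
      simp
  rw [hmapeq]

-- ===== VERDICT (by name: the statement is the Claim_ definition above) =====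
theorem solution_spec : Claim_equal_solution := by
  intro land _ hpre
  unfold Spec_solution
  obtain ⟨hne, hClen, _⟩ := hpre
  have hC : 0 < pvLy land := by
    unfold pvLy
    exact_mod_cast hClen
  rw [pvSolution_A land hC, pvSolution_B land,
    show (PySem.List.pyRange 0 (pvLy land) 1).foldl
        (fun best j => max best (((pvOilList land).countP (fun c => pvTouchB land c j) : Int))) 0
      = ((PySem.List.pyRange 0 (pvLy land) 1).map
          (fun j => ((pvOilList land).countP (fun c => pvTouchB land c j) : Int))).foldl
          (fun b x => max b x) 0 from (List.foldl_map ..).symm]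
  apply pvMax_fold_eq
  · intro hnil
    have := congrArg List.length hnil
    rw [List.length_map, PySem.List.length_pyRange_one] at this
    simp at this
    omega
  · intro x hx
    obtain ⟨j, _, rfl⟩ := List.mem_map.1 hx
    positivity
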